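-- pv_equiv track=rewrite | github.com/shakiliitju/IIT-ChatBot | chatbot.py | build_knowledge_base
-- ===== SOURCE A (Python) =====
-- def build_knowledge_base(content):
--     knowledge_base = []
--     current_section = None
--     current_url = None
--     for text, tag, url in content:
--         if tag in ['h1', 'h2', 'h3']:
--             current_section = text
--             current_url = url
--         elif tag == 'p' and current_section:
--             knowledge_base.append({
--                 "question": current_section,
--                 "answer": text,
--                 "source": current_url
--             })
--     return knowledge_base
-- ===== SOURCE B (Python) =====
-- def build_knowledge_base(content):
--     # Pass 1: group content into sections (header text, header url, paragraphs)
--     groups = []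
--     for text, tag, url in content:
--         if tag in ('h1', 'h2', 'h3'):
--             groups.append((text, url, []))
--         elif tag == 'p' and groups and groups[-1][0]:
--             groups[-1][2].append(text)
--     # Pass 2: emit one Q&A dict per paragraph of each section
--     return [{"question": h, "answer": p, "source": u}
--             for h, u, paras in groups for p in paras]
-- ===== Notes on version B (the rewrite author's own statement) =====
-- stated objective: alternative
-- what changed: Replaces the single loop carrying current-section state and appending dicts with a two-pass decomposition: first group content into section records accumulating paragraphs, then flatten the groups into Q&A dicts.
import Mathlib
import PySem

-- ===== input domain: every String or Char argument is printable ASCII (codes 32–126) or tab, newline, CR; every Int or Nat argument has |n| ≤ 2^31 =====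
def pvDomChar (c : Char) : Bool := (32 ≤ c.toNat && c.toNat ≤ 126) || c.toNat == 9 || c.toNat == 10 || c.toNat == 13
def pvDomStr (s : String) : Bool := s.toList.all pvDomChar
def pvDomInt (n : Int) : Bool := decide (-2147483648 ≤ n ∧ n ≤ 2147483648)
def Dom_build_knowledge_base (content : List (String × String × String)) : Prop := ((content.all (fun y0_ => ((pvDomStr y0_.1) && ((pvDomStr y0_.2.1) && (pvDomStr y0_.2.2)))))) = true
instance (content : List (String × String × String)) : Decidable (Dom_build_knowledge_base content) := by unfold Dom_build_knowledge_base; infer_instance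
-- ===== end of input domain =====

-- ===== PORT A =====
-- B restructures A's single stateful loop into grouping + flattening passes (alternative decomposition).

-- state: (knowledge_base, current_section, current_url)
def kbStep (st : List (List (String × String)) × Option String × Option String)
    (item : String × String × String) :
    List (List (String × String)) × Option String × Option String :=
  match st, item with
  | (kb, cs, cu), (text, tag, url) =>
    if tag = "h1" ∨ tag = "h2" ∨ tag = "h3" then
      (kb, some text, some url)
    else if tag = "p" ∧ cs.getD "" ≠ "" then
      -- when this branch fires, cs = some s (s ≠ "") and cu was set alongside cs, so getD "" is exact
      (kb ++ [[("question", cs.getD ""), ("answer", text), ("source", cu.getD "")]], cs, cu)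
    else
      (kb, cs, cu)

def build_knowledge_base (content : List (String × String × String)) : List (List (String × String)) :=
  (content.foldl kbStep ([], none, none)).1

-- ===== PORT B =====
-- Pass 1 step: groups held newest-first (Python appends at the end; reversed in pass 2)
def grpStep (groups : List (String × String × List String)) (item : String × String × String) :
    List (String × String × List String) :=
  match item with
  | (text, tag, url) =>
    if tag = "h1" ∨ tag = "h2" ∨ tag = "h3" then
      (text, url, []) :: groups
    else if tag = "p" then
      match groups with
      | (h, u, ps) :: rest => if h ≠ "" then (h, u, text :: ps) :: rest else (h, u, ps) :: rest
      | [] => []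
    else
      groups

-- Pass 2: one Q&A record per paragraph of each group (paragraphs were accumulated newest-first)
def emitGroups (groups : List (String × String × List String)) : List (List (String × String)) :=
  groups.reverse.flatMap (fun g =>
    g.2.2.reverse.map (fun p => [("question", g.1), ("answer", p), ("source", g.2.1)]))

def build_knowledge_base_alt (content : List (String × String × String)) : List (List (String × String)) :=
  emitGroups (content.foldl grpStep [])

-- ===== PRECONDITION & SPEC =====
def Spec_build_knowledge_base (content : List (String × String × String)) (out : List (List (String × String))) : Prop := out = build_knowledge_base_alt content
instance (content : List (String × String × String)) (out : List (List (String × String))) : Decidable (Spec_build_knowledge_base content out) := by unfold Spec_build_knowledge_base; infer_instance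

-- ===== CLAIM (what is proved, stated in full; the proofs are below) =====
def Claim_equal_build_knowledge_base : Prop := ∀ (content : List (String × String × String)), Dom_build_knowledge_base content → Spec_build_knowledge_base content (build_knowledge_base content)

-- ===== LEMMAS AND PROOFS =====

-- invariant tying A's state to B's groups
def KBInv (st : List (List (String × String)) × Option String × Option String)
    (groups : List (String × String × List String)) : Prop :=
  st.1 = emitGroups groups ∧
  (match groups with
   | [] => st.2.1 = none
   | (h, u, _) :: _ => st.2.1 = some h ∧ st.2.2 = some u)

lemma emitGroups_cons (h u : String) (ps : List String) (rest : List (String × String × List String)) :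
    emitGroups ((h, u, ps) :: rest) =
      emitGroups rest ++ ps.reverse.map (fun p => [("question", h), ("answer", p), ("source", u)]) := by
  simp [emitGroups]

lemma inv_step (st : List (List (String × String)) × Option String × Option String)
    (groups : List (String × String × List String)) (item : String × String × String)
    (hI : KBInv st groups) : KBInv (kbStep st item) (grpStep groups item) := by
  obtain ⟨kb, cs, cu⟩ := st
  obtain ⟨text, tag, url⟩ := item
  obtain ⟨hkb, hst⟩ := hI
  by_cases hh : tag = "h1" ∨ tag = "h2" ∨ tag = "h3"
  · simp only [kbStep, grpStep, if_pos hh]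
    refine ⟨?_, rfl, rfl⟩
    simpa [emitGroups_cons] using hkb
  · by_cases hp : tag = "p"
    · cases groups with
      | nil =>
        simp at hst
        simp [kbStep, grpStep, hp, hst, KBInv]
        exact hkb
      | cons g rest =>
        obtain ⟨h, u, ps⟩ := g
        obtain ⟨hcs, hcu⟩ := hst
        simp only at hcs hcu hkb
        subst hcs hcu hp
        by_cases hne : h = ""
        · subst hne
          simp only [grpStep, kbStep, KBInv]
          simp [hkb]
        · simp only [grpStep, kbStep, KBInv]
          simp [hne, hkb, emitGroups_cons]
    · have hq : ¬ (tag = "p" ∧ cs.getD "" ≠ "") := by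
        intro hc; exact hp hc.1
      simp only [kbStep, grpStep, if_neg hh, if_neg hq, if_neg hp]
      exact ⟨hkb, hst⟩

lemma foldl_inv (content : List (String × String × String))
    (st : List (List (String × String)) × Option String × Option String)
    (groups : List (String × String × List String)) (hI : KBInv st groups) :
    KBInv (content.foldl kbStep st) (content.foldl grpStep groups) := by
  induction content generalizing st groups with
  | nil => exact hI
  | cons x xs ih => exact ih _ _ (inv_step _ _ _ hI)

-- ===== VERDICT (by name: the statement is the Claim_ definition above) =====
theorem build_knowledge_base_spec : Claim_equal_build_knowledge_base := by
  intro content _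
  have h := foldl_inv content ([], none, none) [] (by simp [KBInv, emitGroups])
  exact h.1
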